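-- pv_equiv track=rewrite | github.com/yabirgb/spsi_tareas | entrega_1/otras_tareas/ejercicio3.py | _split_n_chars
-- ===== SOURCE A (Python) =====
-- def _split_n_chars(msg, k):
--     # En s_i almacenamos las cadenas de caracteres que aparecen cada i
--     # posiciones en el texto de partida
--     s_i=[[]for i in range(k)]
--     pos=0
--     for c in msg:
--         s_i[pos].append(c)
--         pos+=1
--         if pos==k:
--             pos=0
--     # Los caracacteres estan almacenados como una lista y los queremos como
--     # una cadena de texto
--     for i,lst in enumerate(s_i):
--         s_i[i]="".join(lst)
--
--     return s_i
-- ===== SOURCE B (Python) =====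
-- def _split_n_chars(msg, k):
--     # Each output string is the strided slice of positions i, i+k, i+2k, ...;
--     # the "".join keeps list-of-strings inputs behaving as in A.
--     return ["".join(msg[i::k]) for i in range(k)]
-- ===== Notes on version B (the rewrite author's own statement) =====
-- stated objective: simpler
-- what changed: Instead of one pass distributing each character into a rotating bucket (pos counter reset at k), B computes each output string independently as the strided slice msg[i::k] for each i in range(k), maintaining no state between buckets.
import Mathlib
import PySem

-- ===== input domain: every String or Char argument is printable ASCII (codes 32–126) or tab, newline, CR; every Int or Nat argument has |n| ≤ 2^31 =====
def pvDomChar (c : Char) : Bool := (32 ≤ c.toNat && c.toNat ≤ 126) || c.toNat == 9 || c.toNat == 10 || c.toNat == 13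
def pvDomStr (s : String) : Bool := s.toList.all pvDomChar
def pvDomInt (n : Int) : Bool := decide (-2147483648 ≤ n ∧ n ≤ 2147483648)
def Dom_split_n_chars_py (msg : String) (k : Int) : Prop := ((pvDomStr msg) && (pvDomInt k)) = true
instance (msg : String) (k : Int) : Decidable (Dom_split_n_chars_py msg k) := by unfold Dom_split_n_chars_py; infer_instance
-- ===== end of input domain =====

-- B replaces A's single distributing pass (rotating pos counter) by an independent
-- strided slice msg[i::k] per bucket; same cost, simpler decomposition (objective: simpler).

-- ===== PORT A =====
-- the 'for c in msg' loop of A: state is the bucket list s_i and the rotating counter pos.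
-- 's_i[pos].append(c)' is ported as List.modify at pos.toNat — exact whenever 0 ≤ pos < len(s_i),
-- which holds throughout on Pre_ (outside it Python raises IndexError, excluded by Pre_).
def pvLoopA (k : Int) (s : List (List Char)) (pos : Int) : List Char → List (List Char)
  | [] => s
  | c :: cs =>
      pvLoopA k (s.modify pos.toNat (fun l => l ++ [c])) (if pos + 1 = k then 0 else pos + 1) cs

def split_n_chars_py (msg : String) (k : Int) : List String :=
  let s_i : List (List Char) := (PySem.List.pyRange 0 k 1).map (fun _ => [])
  -- second loop: join each bucket into a string
  (pvLoopA k s_i 0 msg.toList).map (fun lst => String.ofList lst)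

-- ===== PORT B =====
-- B: ["".join(msg[i::k]) for i in range(k)].  msg is a String on this domain, so
-- '"".join' over the slice's characters is the identity and the element is the slice
-- itself, PySem.Str.slice? msg (some i) none k; '.getD ""' totalises the Option
-- (slice? is none only for step k = 0, and then range(k) is empty so the body never runs).
def split_n_chars_py_alt (msg : String) (k : Int) : List String :=
  (PySem.List.pyRange 0 k 1).map (fun i => (PySem.Str.slice? msg (some i) none k).getD "")

-- ===== PRECONDITION & SPEC =====
-- Pre_ excludes exactly the inputs on which A raises: k ≤ 0 with nonempty msg makes
-- A's bucket list empty and 's_i[pos].append(c)' raise IndexError on the first character.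
def Pre_split_n_chars_py (msg : String) (k : Int) : Prop := 0 < k ∨ msg = ""
instance (msg : String) (k : Int) : Decidable (Pre_split_n_chars_py msg k) := by unfold Pre_split_n_chars_py; infer_instance
def pvWitness_split_n_chars_py : String × Int := ("hola mundo!", 3)

def Spec_split_n_chars_py (msg : String) (k : Int) (out : List String) : Prop := out = split_n_chars_py_alt msg k
instance (msg : String) (k : Int) (out : List String) : Decidable (Spec_split_n_chars_py msg k out) := by unfold Spec_split_n_chars_py; infer_instance

-- ===== CLAIM (what is proved, stated in full; the proofs are below) =====
def Claim_equal_split_n_chars_py : Prop := ∀ (msg : String) (k : Int), Dom_split_n_chars_py msg k → Pre_split_n_chars_py msg k → Spec_split_n_chars_py msg k (split_n_chars_py msg k)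

-- ===== LEMMAS AND PROOFS =====

-- every k-th character of cs, starting at its head (what the slice msg[i::k]
-- computes on the suffix cs = msg[i:], for k ≥ 1)
def pvStrideB (k : Nat) (cs : List Char) : List Char :=
  match cs with
  | [] => []
  | c :: rest => c :: pvStrideB k (rest.drop (k - 1))
  termination_by cs.length
  decreasing_by simp only [List.length_drop, List.length_cons]; omega

theorem pvStrideB_nil (k : Nat) : pvStrideB k [] = [] := by rw [pvStrideB]

theorem pvStrideB_cons (k : Nat) (c : Char) (rest : List Char) :
    pvStrideB k (c :: rest) = c :: pvStrideB k (rest.drop (k - 1)) := by rw [pvStrideB]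

-- pvStrideB is the slice?'s filterMap-over-range form
theorem stride_filterMap (k : Nat) (hk : 0 < k) :
    ∀ (L : Nat) (cs : List Char), cs.length = L →
      pvStrideB k cs = (List.range ((L + k - 1) / k)).filterMap (fun j => cs[k*j]?) := by
  intro L
  induction L using Nat.strong_induction_on with
  | _ L ih =>
    intro cs hL
    match cs with
    | [] =>
        have : L = 0 := by simp at hL; omega
        subst this
        simp [pvStrideB_nil]
    | c :: rest =>
        have hL1 : 1 ≤ L := by simp at hL; omega
        have hcnt : (L + k - 1) / k = ((L - k) + k - 1) / k + 1 := by
          by_cases h : L ≤ k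
          · have h1 : L - k = 0 := by omega
            rw [h1, Nat.zero_add]
            have : (k - 1) / k = 0 := Nat.div_eq_of_lt (by omega)
            rw [this]
            have : L + k - 1 = (L - 1) + k := by omega
            rw [this, Nat.add_div_right _ hk]
            have : (L - 1) / k = 0 := Nat.div_eq_of_lt (by omega)
            omega
          · have : L + k - 1 = ((L - k) + k - 1) + k := by omega
            rw [this, Nat.add_div_right _ hk]
        rw [hcnt, List.range_succ_eq_map]
        rw [List.filterMap_cons, List.filterMap_map]
        have h0 : (c :: rest)[k*0]? = some c := by simp
        simp only [h0]
        have hdrop : (c :: rest).drop k = rest.drop (k - 1) := by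
          match k, hk with
          | k+1, _ => simp
        have hlen : (rest.drop (k-1)).length = L - k := by
          simp [List.length_drop]; simp at hL; omega
        rw [pvStrideB_cons, ih (L - k) (by omega) _ hlen]
        congr 1
        apply List.filterMap_congr
        intro j hj
        simp only [Function.comp]
        rw [← hdrop, List.getElem?_drop]
        simp [Nat.succ_eq_add_one]
        congr 1
        ring

-- the extended slice xs[i::k] (k ≥ 1, i ≥ 0) is exactly pvStrideB on the suffix
theorem slice?_stride (xs : List Char) (i k : Nat) (hk : 0 < k) :
    PySem.List.slice? xs (some (i : Int)) none (k : Int) = some (pvStrideB k (xs.drop i)) := by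
  have hk0 : ¬ ((k : Int) = 0) := by omega
  have hkneg : ¬ ((k : Int) < 0) := by omega
  have hi : ¬ ((i : Int) < 0) := by omega
  have hkpos : (0 : Int) < (k : Int) := by omega
  simp only [PySem.List.slice?, PySem.List.sliceIndices, hk0, hkneg, hi, hkpos,
    if_false, if_true]
  rw [show (min (i:Int) (xs.length:Int)) = ((min i xs.length : Nat) : Int) by push_cast; omega]
  set n := xs.length with hn
  set m := min i n with hmdef
  have hm : m ≤ n := by omega
  have hdropim : xs.drop i = xs.drop m := by
    by_cases h : i ≤ n
    · have : m = i := by omega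
      rw [this]
    · have h1 : xs.drop i = [] := List.drop_eq_nil_of_le (by omega)
      have h2 : xs.drop m = [] := List.drop_eq_nil_of_le (by omega)
      rw [h1, h2]
  have hlen : (xs.drop i).length = n - m := by
    rw [hdropim, List.length_drop]
  have hcount : (if (m : Int) < (n : Int) then (((n : Int) - m + k - 1) / k).toNat else 0)
      = (n - m + k - 1) / k := by
    by_cases h : m < n
    · have h1 : ((m : Int) < (n : Int)) := by omega
      rw [if_pos h1]
      have h2 : ((n : Int) - m + k - 1) = ((n - m + k - 1 : Nat) : Int) := by omega
      rw [h2]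
      exact_mod_cast rfl
    · have hmn : m = n := by omega
      have h1 : ¬ ((m : Int) < (n : Int)) := by omega
      rw [if_neg h1, hmn]
      have : n - n + k - 1 = k - 1 := by omega
      rw [this]
      exact (Nat.div_eq_of_lt (by omega)).symm
  rw [hcount, stride_filterMap k hk (n - m) (xs.drop i) hlen]
  congr 1
  apply List.filterMap_congr
  intro j hj
  rw [hdropim, List.getElem?_drop]
  congr 1

-- offset inside the remaining input at which bucket j receives its next character,
-- when A's loop counter currently stands at p (all of j, p < n)
def pvOff (j p n : Nat) : Nat := if p ≤ j then j - p else j + n - p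

theorem pvLoopA_length (k : Int) (cs : List Char) (s : List (List Char)) (pos : Int) :
    (pvLoopA k s pos cs).length = s.length := by
  induction cs generalizing s pos with
  | nil => rfl
  | cons c cs ih => simp [pvLoopA, ih, List.length_modify]

theorem pvLoopA_getElem? (n : Nat) (hn : 0 < n) (cs : List Char) :
    ∀ (s : List (List Char)) (p j : Nat) (hs : s.length = n), p < n → (hj : j < n) →
    (pvLoopA (n : Int) s (p : Int) cs)[j]? =
      some (s[j]'(hs.symm ▸ hj) ++ pvStrideB n (cs.drop (pvOff j p n))) := by
  induction cs with
  | nil =>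
      intro s p j hs hp hj
      rw [List.getElem?_eq_getElem (hs.symm ▸ hj)]
      simp [pvLoopA, pvStrideB_nil]
  | cons c cs ih =>
      intro s p j hs hp hj
      have hpt : ((p : Int)).toNat = p := by omega
      have hstep : pvLoopA (n : Int) s (p : Int) (c :: cs) =
          pvLoopA (n : Int) (s.modify p (fun l => l ++ [c]))
            (((if p + 1 = n then 0 else p + 1 : Nat) : Int)) cs := by
        simp only [pvLoopA, hpt]
        congr 1
        by_cases h : p + 1 = n
        · simp [h]; omega
        · have : ¬ ((p : Int) + 1 = (n : Int)) := by omega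
          simp [h, this]
      set p' : Nat := if p + 1 = n then 0 else p + 1 with hp'
      have hp'lt : p' < n := by simp only [hp']; split <;> omega
      have hlen : (s.modify p (fun l => l ++ [c])).length = n := by
        simp [List.length_modify, hs]
      rw [hstep, ih _ p' j hlen hp'lt hj]
      by_cases hjp : j = p
      · -- this character goes to bucket j
        subst hjp
        have ho : pvOff j j n = 0 := by simp [pvOff]
        have ho' : pvOff j p' n = n - 1 := by
          simp only [pvOff, hp']; split <;> split <;> omega
        have hget : (s.modify j (fun l => l ++ [c]))[j]'(by omega : j < (s.modify j _).length)
            = s[j]'(by omega) ++ [c] := by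
          rw [List.getElem_modify_eq]
        rw [ho, ho', hget]
        simp [pvStrideB_cons, List.append_assoc]
      · -- bucket j untouched; its next character moved one position closer
        have ho : pvOff j p n = pvOff j p' n + 1 := by
          simp only [pvOff, hp']; split <;> split <;> split <;> omega
        have hget : (s.modify p (fun l => l ++ [c]))[j]'(by omega : j < (s.modify p _).length)
            = s[j]'(by omega) := by
          rw [List.getElem_modify_ne _ _ (fun h => hjp h.symm)]
        rw [ho, hget, List.drop_succ_cons]

-- ===== VERDICT =====
theorem split_n_chars_py_spec : Claim_equal_split_n_chars_py := by
  intro msg k _hdom hpre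
  unfold Spec_split_n_chars_py split_n_chars_py split_n_chars_py_alt
  by_cases hk : 0 < k
  · set n : Nat := k.toNat with hn
    have hkn : (n : Int) = k := by omega
    have hnpos : 0 < n := by omega
    set s0 : List (List Char) := (PySem.List.pyRange 0 k 1).map (fun _ => ([] : List Char)) with hs0
    have hlenr : (PySem.List.pyRange 0 k 1).length = n := by
      rw [PySem.List.length_pyRange_one]; omega
    have hls0 : s0.length = n := by simp [hs0, hlenr]
    apply List.ext_getElem?
    intro i
    by_cases hi : i < n
    · have hA := pvLoopA_getElem? n hnpos msg.toList s0 0 i hls0 hnpos hi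
      rw [show ((0:Nat):Int) = (0:Int) by norm_num] at hA
      have hs0i : s0[i]'(by omega) = [] := by simp [hs0]
      rw [List.getElem?_map, ← hkn, hA, hs0i]
      have hoff : pvOff i 0 n = i := by simp [pvOff]
      rw [hoff]
      have hr : (PySem.List.pyRange 0 ((n : Int)) 1)[i]? = some ((i : Nat) : Int) := by
        rw [List.getElem?_eq_getElem (by rw [hkn, hlenr]; omega),
            PySem.List.getElem_pyRange_one]
        simp
      rw [List.getElem?_map, hr]
      have hslice : PySem.Str.slice? msg (some ((i : Nat) : Int)) none ((n : Nat) : Int)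
          = some (String.ofList (pvStrideB n (msg.toList.drop i))) := by
        simp only [PySem.Str.slice?, PySem.Chars.slice?, slice?_stride msg.toList i n hnpos,
          Option.map_some]
      simp [hslice]
    · have h1 : (((pvLoopA k s0 0 msg.toList).map (fun lst => String.ofList lst)))[i]? = none := by
        rw [List.getElem?_eq_none]
        rw [List.length_map, pvLoopA_length, hls0]; omega
      have h2 : (((PySem.List.pyRange 0 k 1).map
          (fun j => (PySem.Str.slice? msg (some j) none k).getD "")))[i]? = none := by
        rw [List.getElem?_eq_none]
        rw [List.length_map, hlenr]; omega
      rw [h1, h2]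
  · -- k ≤ 0: Pre_ forces msg = "", and range(k) is empty, so both sides are []
    have hmsg : msg = "" := by
      rcases hpre with h | h
      · exact absurd h hk
      · exact h
    subst hmsg
    have hr : PySem.List.pyRange 0 k 1 = [] := PySem.List.pyRange_one_eq_nil (by omega)
    simp [hr, pvLoopA]
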